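-- pv_equiv track=rewrite | github.com/DeFox30/Zorin20121 | laba 2.py | threats
-- ===== SOURCE A (Python) =====
-- def threats(board, n):
--     # Генерация доски с угрозами
--     threat_board = [['0'] * n for _ in range(n)]
--     for i in range(n):
--         for j in range(n):
--             if board[i][j] == 1:
--                 threat_moves = [
--                     (3, 1), (3, -1), (-3, 1), (-3, -1),
--                     (1, 3), (1, -3), (-1, 3), (-1, -3)
--                 ]
--                 for dx, dy in threat_moves:
--                     if 0 <= i + dx < n and 0 <= j + dy < n:
--                         threat_board[i + dx][j + dy] = '*'
--     return threat_board
-- ===== SOURCE B (Python) =====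
-- def threats(board, n):
--     moves = [(3, 1), (3, -1), (-3, 1), (-3, -1),
--              (1, 3), (1, -3), (-1, 3), (-1, -3)]
--     return [['*' if any(0 <= i + dx < n and 0 <= j + dy < n
--                         and board[i + dx][j + dy] == 1
--                         for dx, dy in moves) else '0'
--              for j in range(n)]
--             for i in range(n)]
-- ===== Notes on version B (the rewrite author's own statement) =====
-- stated objective: alternative
-- what changed: B pulls: it builds the result by comprehension, deciding each output cell directly from the (negation-symmetric) move set, instead of A's push that allocates a mutable board and stamps '*' from every piece.
import Mathlib
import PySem

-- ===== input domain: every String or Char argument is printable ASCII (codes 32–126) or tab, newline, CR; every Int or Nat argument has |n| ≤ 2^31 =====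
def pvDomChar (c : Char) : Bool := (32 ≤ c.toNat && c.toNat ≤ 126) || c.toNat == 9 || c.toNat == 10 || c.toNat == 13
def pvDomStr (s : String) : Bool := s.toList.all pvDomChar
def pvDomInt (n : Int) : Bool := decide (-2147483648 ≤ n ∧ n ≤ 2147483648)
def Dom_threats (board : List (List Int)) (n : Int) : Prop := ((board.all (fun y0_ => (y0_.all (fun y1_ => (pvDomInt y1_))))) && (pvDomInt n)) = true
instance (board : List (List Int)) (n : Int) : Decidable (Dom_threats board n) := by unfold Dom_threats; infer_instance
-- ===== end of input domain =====

-- B re-implements the threat board by a pull traversal (each output cell decides itself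
-- from the negation-symmetric move set) instead of A's push that mutates a board from each piece.

-- ===== PORT A =====
-- the eight knight-like threat moves (both Pythons use this same literal list)
def pvMoves : List (Int × Int) :=
  [(3, 1), (3, -1), (-3, 1), (-3, -1), (1, 3), (1, -3), (-1, 3), (-1, -3)]

-- board[i][j] (two chained Python indexings; none exactly where Python raises IndexError)
def pvGet2? (board : List (List Int)) (i j : Int) : Option Int :=
  (PySem.List.pyGet? board i).bind (fun row => PySem.List.pyGet? row j)

-- 'threat_board[r][c] = "*"' — exact for the in-range nonnegative indices A uses
def pvSetStar (tb : List (List String)) (r c : Int) : List (List String) :=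
  tb.set r.toNat ((tb.getD r.toNat []).set c.toNat "*")

def threats (board : List (List Int)) (n : Int) : List (List String) :=
  (PySem.List.pyRange 0 n 1).foldl (fun tb i =>
    (PySem.List.pyRange 0 n 1).foldl (fun tb j =>
      if pvGet2? board i j == some 1 then
        pvMoves.foldl (fun tb m =>
          if 0 ≤ i + m.1 ∧ i + m.1 < n ∧ 0 ≤ j + m.2 ∧ j + m.2 < n then
            pvSetStar tb (i + m.1) (j + m.2)
          else tb) tb
      else tb) tb) (List.replicate n.toNat (List.replicate n.toNat "0"))

-- ===== PORT B =====
def threats_alt (board : List (List Int)) (n : Int) : List (List String) :=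
  (PySem.List.pyRange 0 n 1).map (fun i =>
    (PySem.List.pyRange 0 n 1).map (fun j =>
      if pvMoves.any (fun m =>
          decide (0 ≤ i + m.1) && decide (i + m.1 < n) &&
          decide (0 ≤ j + m.2) && decide (j + m.2 < n) &&
          (pvGet2? board (i + m.1) (j + m.2) == some 1))
      then "*" else "0"))

-- ===== PRECONDITION & SPEC =====
-- Pre_ excludes exactly the inputs where A raises IndexError: when n > 0, A reads
-- board[i][j] for all 0 ≤ i, j < n, so board needs at least n rows of length ≥ n each.
def Pre_threats (board : List (List Int)) (n : Int) : Prop :=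
  0 < n → (n ≤ (board.length : Int) ∧ ∀ row ∈ board.take n.toNat, n ≤ (row.length : Int))
instance (board : List (List Int)) (n : Int) : Decidable (Pre_threats board n) := by
  unfold Pre_threats; infer_instance

def pvWitness_threats : List (List Int) × Int := ([[1, 0], [0, 0]], 2)

def Spec_threats (board : List (List Int)) (n : Int) (out : List (List String)) : Prop :=
  out = threats_alt board n
instance (board : List (List Int)) (n : Int) (out : List (List String)) :
    Decidable (Spec_threats board n out) := by unfold Spec_threats; infer_instance

-- ===== CLAIM (what is proved, stated in full; the proofs are below) =====
def Claim_equal_threats : Prop := ∀ (board : List (List Int)) (n : Int),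
  Dom_threats board n → Pre_threats board n → Spec_threats board n (threats board n)

-- ===== LEMMAS AND PROOFS =====

def pvShape (tb : List (List String)) (N : Nat) : Prop :=
  tb.length = N ∧ ∀ row ∈ tb, row.length = N

def pvGetE (tb : List (List String)) (p q : Nat) : String :=
  ((tb[p]?.getD [])[q]?).getD "0"

theorem pvSetStar_shape (tb : List (List String)) (N : Nat) (r c : Int)
    (h : pvShape tb N) (hr : r.toNat < N) : pvShape (pvSetStar tb r c) N := by
  obtain ⟨hl, hrow⟩ := h
  refine ⟨by simp [pvSetStar, hl], ?_⟩
  intro row hmem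
  rcases List.mem_or_eq_of_mem_set hmem with h1 | h1
  · exact hrow _ h1
  · subst h1
    rw [List.length_set]
    rw [List.getD_eq_getElem _ _ (by omega)]
    exact hrow _ (List.getElem_mem _)

theorem pvSetStar_getE (tb : List (List String)) (N : Nat) (r c : Int) (p q : Nat)
    (h : pvShape tb N) (hr0 : 0 ≤ r) (hr : r < (N : Int)) (hc0 : 0 ≤ c) (hc : c < (N : Int))
    (hp : p < N) (hq : q < N) :
    pvGetE (pvSetStar tb r c) p q =
      if r = (p : Int) ∧ c = (q : Int) then "*" else pvGetE tb p q := by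
  obtain ⟨hl, hrow⟩ := h
  have hrN : r.toNat < tb.length := by omega
  have hrowlen : (tb.getD r.toNat []).length = N := by
    rw [List.getD_eq_getElem _ _ hrN]; exact hrow _ (List.getElem_mem _)
  by_cases hpr : r = (p : Int)
  · have hpt : r.toNat = p := by omega
    subst hpt
    by_cases hqc : c = (q : Int)
    · have hqt : c.toNat = q := by omega
      subst hqt
      rw [if_pos ⟨hpr, hqc⟩]
      simp only [pvGetE, pvSetStar]
      rw [List.getElem?_set_self hrN, Option.getD_some]
      rw [List.getElem?_set_self (by omega), Option.getD_some]
    · have hqt : c.toNat ≠ q := by omega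
      rw [if_neg (fun hx => hqc hx.2)]
      simp only [pvGetE, pvSetStar]
      rw [List.getElem?_set_self hrN, Option.getD_some]
      rw [List.getElem?_set_ne hqt]
      rw [List.getD_eq_getElem?_getD]
  · have hpt : r.toNat ≠ p := by omega
    rw [if_neg (fun hx => hpr hx.1)]
    simp only [pvGetE, pvSetStar]
    rw [List.getElem?_set_ne hpt]

-- a fold of entry-local marking steps: shape is preserved and an entry becomes '*' iff some step hits it
theorem pvFoldMark {α : Type} (xs : List α) (step : List (List String) → α → List (List String))
    (hit : α → Bool) (N p q : Nat)
    (hsh : ∀ tb x, pvShape tb N → pvShape (step tb x) N)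
    (hst : ∀ tb x, pvShape tb N → pvGetE (step tb x) p q = if hit x then "*" else pvGetE tb p q) :
    ∀ tb, pvShape tb N → pvShape (xs.foldl step tb) N ∧
      pvGetE (xs.foldl step tb) p q = if xs.any hit then "*" else pvGetE tb p q := by
  induction xs with
  | nil => intro tb h; exact ⟨h, by simp⟩
  | cons x xs ih =>
    intro tb h
    have h1 := hsh tb x h
    obtain ⟨ihs, ihe⟩ := ih (step tb x) h1
    refine ⟨by simpa using ihs, ?_⟩
    simp only [List.foldl_cons, List.any_cons]
    rw [ihe, hst tb x h]
    by_cases hx : hit x = true <;> by_cases hxs : xs.any hit = true <;> simp [hx, hxs]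

theorem pvMoves_neg : ∀ m ∈ pvMoves, (-m.1, -m.2) ∈ pvMoves := by decide

def pvHitM (n i j : Int) (p q : Nat) (m : Int × Int) : Bool :=
  decide ((0 ≤ i + m.1 ∧ i + m.1 < n ∧ 0 ≤ j + m.2 ∧ j + m.2 < n) ∧
          i + m.1 = (p : Int) ∧ j + m.2 = (q : Int))

def pvHitJ (board : List (List Int)) (n i : Int) (p q : Nat) (j : Int) : Bool :=
  (pvGet2? board i j == some 1) && pvMoves.any (pvHitM n i j p q)

def pvHitI (board : List (List Int)) (n : Int) (p q : Nat) (i : Int) : Bool :=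
  (PySem.List.pyRange 0 n 1).any (pvHitJ board n i p q)

theorem threats_entry (board : List (List Int)) (n : Int) (N p q : Nat)
    (hn : n = (N : Int)) (hp : p < N) (hq : q < N) :
    pvShape (threats board n) N ∧
    pvGetE (threats board n) p q =
      if (PySem.List.pyRange 0 n 1).any (pvHitI board n p q) then "*" else "0" := by
  have hNt : n.toNat = N := by omega
  have htb0 : pvShape (List.replicate n.toNat (List.replicate n.toNat "0")) N := by
    constructor
    · simp [hNt]
    · intro row hr; rw [List.eq_of_mem_replicate hr]; simp [hNt]
  have hE0 : pvGetE (List.replicate n.toNat (List.replicate n.toNat "0")) p q = "0" := by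
    simp [pvGetE, hNt, hp, hq]
  have moves_level : ∀ (i j : Int), ∀ tb, pvShape tb N →
      pvShape (pvMoves.foldl (fun tb m =>
        if 0 ≤ i + m.1 ∧ i + m.1 < n ∧ 0 ≤ j + m.2 ∧ j + m.2 < n then
          pvSetStar tb (i + m.1) (j + m.2)
        else tb) tb) N ∧
      pvGetE (pvMoves.foldl (fun tb m =>
        if 0 ≤ i + m.1 ∧ i + m.1 < n ∧ 0 ≤ j + m.2 ∧ j + m.2 < n then
          pvSetStar tb (i + m.1) (j + m.2)
        else tb) tb) p q =
        if pvMoves.any (pvHitM n i j p q) then "*" else pvGetE tb p q := by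
    intro i j
    refine pvFoldMark _ _ _ N p q ?_ ?_
    · intro tb m hs
      by_cases hg : 0 ≤ i + m.1 ∧ i + m.1 < n ∧ 0 ≤ j + m.2 ∧ j + m.2 < n
      · rw [if_pos hg]
        exact pvSetStar_shape _ _ _ _ hs (by omega)
      · rw [if_neg hg]; exact hs
    · intro tb m hs
      by_cases hg : 0 ≤ i + m.1 ∧ i + m.1 < n ∧ 0 ≤ j + m.2 ∧ j + m.2 < n
      · rw [if_pos hg]
        rw [pvSetStar_getE tb N _ _ p q hs (by omega) (by omega) (by omega) (by omega) hp hq]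
        have hiff : (pvHitM n i j p q m = true) ↔ (i + m.1 = (p : Int) ∧ j + m.2 = (q : Int)) := by
          simp only [pvHitM, decide_eq_true_eq]
          exact ⟨fun hx => hx.2, fun hx => ⟨hg, hx⟩⟩
        by_cases he : i + m.1 = (p : Int) ∧ j + m.2 = (q : Int)
        · rw [if_pos he, if_pos (hiff.mpr he)]
        · rw [if_neg he, if_neg (fun hx => he (hiff.mp hx))]
      · rw [if_neg hg]
        have hf : ¬ (pvHitM n i j p q m = true) := by
          simp only [pvHitM, decide_eq_true_eq]
          exact fun hx => hg hx.1
        rw [if_neg hf]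
  have j_level : ∀ (i : Int), ∀ tb, pvShape tb N →
      pvShape ((PySem.List.pyRange 0 n 1).foldl (fun tb j =>
        if pvGet2? board i j == some 1 then
          pvMoves.foldl (fun tb m =>
            if 0 ≤ i + m.1 ∧ i + m.1 < n ∧ 0 ≤ j + m.2 ∧ j + m.2 < n then
              pvSetStar tb (i + m.1) (j + m.2)
            else tb) tb
        else tb) tb) N ∧
      pvGetE ((PySem.List.pyRange 0 n 1).foldl (fun tb j =>
        if pvGet2? board i j == some 1 then
          pvMoves.foldl (fun tb m =>
            if 0 ≤ i + m.1 ∧ i + m.1 < n ∧ 0 ≤ j + m.2 ∧ j + m.2 < n then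
              pvSetStar tb (i + m.1) (j + m.2)
            else tb) tb
        else tb) tb) p q =
        if (PySem.List.pyRange 0 n 1).any (pvHitJ board n i p q) then "*" else pvGetE tb p q := by
    intro i
    refine pvFoldMark _ _ _ N p q ?_ ?_
    · intro tb j hs
      by_cases hpc : (pvGet2? board i j == some 1) = true
      · rw [if_pos hpc]
        exact (moves_level i j tb hs).1
      · rw [if_neg hpc]; exact hs
    · intro tb j hs
      by_cases hpc : (pvGet2? board i j == some 1) = true
      · rw [if_pos hpc, (moves_level i j tb hs).2]
        have hJ : pvHitJ board n i p q j = pvMoves.any (pvHitM n i j p q) := by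
          rw [pvHitJ, hpc, Bool.true_and]
        rw [hJ]
      · rw [if_neg hpc]
        have hf : pvHitJ board n i p q j = false := by
          rw [pvHitJ, Bool.not_eq_true] at *
          rw [hpc, Bool.false_and]
        rw [hf, if_neg (by simp)]
  have main := pvFoldMark (PySem.List.pyRange 0 n 1) _ (pvHitI board n p q) N p q
      (fun tb i hs => (j_level i tb hs).1)
      (fun tb i hs => by rw [(j_level i tb hs).2]; rfl)
      (List.replicate n.toNat (List.replicate n.toNat "0")) htb0
  refine ⟨main.1, ?_⟩
  rw [show threats board n = (PySem.List.pyRange 0 n 1).foldl _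
        (List.replicate n.toNat (List.replicate n.toNat "0")) from rfl]
  rw [main.2, hE0]

theorem pvPushPull (board : List (List Int)) (n : Int) (N p q : Nat)
    (hn : n = (N : Int)) (hp : p < N) (hq : q < N) :
    (PySem.List.pyRange 0 n 1).any (pvHitI board n p q) =
    pvMoves.any (fun m =>
      decide (0 ≤ (p : Int) + m.1) && decide ((p : Int) + m.1 < n) &&
      decide (0 ≤ (q : Int) + m.2) && decide ((q : Int) + m.2 < n) &&
      (pvGet2? board ((p : Int) + m.1) ((q : Int) + m.2) == some 1)) := by
  rw [Bool.eq_iff_iff]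
  simp only [List.any_eq_true, pvHitI, pvHitJ, pvHitM, Bool.and_eq_true, decide_eq_true_eq,
    beq_iff_eq, PySem.List.mem_pyRange_one, and_assoc]
  constructor
  · rintro ⟨i, hi0, hin, j, hj0, hjn, hpiece, m, hm, hg1, hg2, hg3, hg4, he1, he2⟩
    refine ⟨(-m.1, -m.2), pvMoves_neg m hm,
      by show (0:Int) ≤ (p : Int) + -m.1; omega,
      by show (p : Int) + -m.1 < n; omega,
      by show (0:Int) ≤ (q : Int) + -m.2; omega,
      by show (q : Int) + -m.2 < n; omega, ?_⟩
    have h1 : (p : Int) + (-m.1, -m.2).1 = i := by show (p : Int) + -m.1 = i; omega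
    have h2 : (q : Int) + (-m.1, -m.2).2 = j := by show (q : Int) + -m.2 = j; omega
    rw [h1, h2]; exact hpiece
  · rintro ⟨m, hm, h1, h2, h3, h4, hpiece⟩
    refine ⟨(p : Int) + m.1, h1, h2, (q : Int) + m.2, h3, h4, hpiece,
      (-m.1, -m.2), pvMoves_neg m hm,
      by show (0:Int) ≤ (p : Int) + m.1 + -m.1; omega,
      by show (p : Int) + m.1 + -m.1 < n; omega,
      by show (0:Int) ≤ (q : Int) + m.2 + -m.2; omega,
      by show (q : Int) + m.2 + -m.2 < n; omega,
      by show (p : Int) + m.1 + -m.1 = (p : Int); omega,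
      by show (q : Int) + m.2 + -m.2 = (q : Int); omega⟩

-- ===== VERDICT (by name: the statement is the Claim_ definition above) =====
theorem threats_spec : Claim_equal_threats := by
  intro board n _ _
  unfold Spec_threats
  by_cases hn : 0 < n
  · set N := n.toNat with hNdef
    have hn' : n = (N : Int) := by omega
    have hrange : PySem.List.pyRange 0 n 1 = (List.range N).map (fun (k : Nat) => (k : Int)) := by
      rw [hn']; exact PySem.List.pyRange_zero_natCast N
    have hNpos : 0 < N := by omega
    have hshape := (threats_entry board n N 0 0 hn' hNpos hNpos).1
    have hlenA : (threats board n).length = N := hshape.1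
    have hlenB : (threats_alt board n).length = N := by
      simp [threats_alt, hrange]
    apply List.ext_getElem (by rw [hlenA, hlenB])
    intro p hp1 hp2
    have hpN : p < N := by omega
    have hrowA : (threats board n)[p].length = N := hshape.2 _ (List.getElem_mem _)
    have hrowB : (threats_alt board n)[p].length = N := by
      simp [threats_alt, hrange]
    apply List.ext_getElem (by rw [hrowA, hrowB])
    intro q hq1 hq2
    have hqN : q < N := by omega
    have hA : (threats board n)[p][q] = pvGetE (threats board n) p q := by
      simp only [pvGetE]
      rw [List.getElem?_eq_getElem hp1, Option.getD_some,
        List.getElem?_eq_getElem hq1, Option.getD_some]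
    rw [hA, (threats_entry board n N p q hn' hpN hqN).2,
      pvPushPull board n N p q hn' hpN hqN]
    simp only [threats_alt, hrange, List.getElem_map, List.getElem_range]
  · have hr : PySem.List.pyRange 0 n 1 = [] := by
      rw [List.eq_nil_iff_forall_not_mem]
      intro x hx
      have := PySem.List.mem_pyRange_one.mp hx
      omega
    have htn : n.toNat = 0 := by omega
    simp [threats, threats_alt, hr, htn]
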